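-- pv_equiv track=rewrite | github.com/SanthoshKannanSP/advent-of-code-2023 | day13/solution.py | part1
-- ===== SOURCE A (Python) =====
-- def find_mirror(grid):
--     for i in range(1, len(grid)):
--         above = grid[:i][::-1]
--         below = grid[i:]
--
--         above = above[: len(below)]
--         below = below[: len(above)]
--
--         if above == below:
--             return i
--
--     return 0
--
-- def part1(data):
--     ans = 0
--     for block in data:
--         grid = block.split("\n")
--
--         row = find_mirror(grid)
--         ans += row * 100
--
--         col = find_mirror(list(zip(*grid)))
--         ans += col
--
--     return ans
-- ===== SOURCE B (Python) =====
-- # Z-function (prefix-matching LCP array) on rows+sep+reversed-rows: a reflection is an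
-- # even palindrome anchored at the grid's top or bottom edge, read off from the Z-array.
--
-- def _z(s):
--     n = len(s)
--     z = [0] * n
--     l = r = 0
--     for i in range(1, n):
--         k = min(z[i - l], r - i) if i < r else 0
--         while i + k < n and s[k] == s[i + k]:
--             k += 1
--         z[i] = k
--         if i + k > r:
--             l, r = i, i + k
--     return z
--
-- def _mirror(rows):
--     n = len(rows)
--     if n < 2:
--         return 0
--     rev = rows[::-1]
--     zl = _z(rows + [None] + rev)   # even palindromic prefixes of rows
--     zr = _z(rev + [None] + rows)   # even palindromic suffixes of rows
--     for i in range(1, n):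
--         if 2 * i <= n:
--             ok = zl[2 * n + 1 - 2 * i] == 2 * i
--         else:
--             m = n - i
--             ok = zr[2 * n + 1 - 2 * m] == 2 * m
--         if ok:
--             return i
--     return 0
--
-- def part1(data):
--     total = 0
--     for block in data:
--         rows = block.split("\n")
--         total += 100 * _mirror(rows)
--         total += _mirror(list(zip(*rows)))
--     return total
-- ===== Notes on version B (the rewrite author's own statement) =====
-- stated objective: alternative
-- what changed: B replaces A's per-crease reversed-slice comparison with a Z-function (LCP array with the l/r reuse window) over rows+sentinel+reversed-rows: a reflection is an edge-anchored even palindrome read off from two Z-arrays, instead of building and comparing two slices per candidate crease.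
import Mathlib
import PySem

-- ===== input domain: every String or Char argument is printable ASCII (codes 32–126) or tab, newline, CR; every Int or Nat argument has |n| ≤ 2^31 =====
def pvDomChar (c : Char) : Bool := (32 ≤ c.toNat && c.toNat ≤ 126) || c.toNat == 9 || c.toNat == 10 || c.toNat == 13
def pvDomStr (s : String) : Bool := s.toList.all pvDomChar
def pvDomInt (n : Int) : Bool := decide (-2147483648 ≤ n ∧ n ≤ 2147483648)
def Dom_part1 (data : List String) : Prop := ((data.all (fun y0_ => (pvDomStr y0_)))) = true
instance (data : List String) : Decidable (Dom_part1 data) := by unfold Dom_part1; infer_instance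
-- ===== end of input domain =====

-- B replaces A's per-crease reversed-slice comparison with Z-arrays (LCP with the l/r reuse
-- window) over rows+sentinel+reversed-rows, reading reflections off as edge-anchored even
-- palindromes (objective: alternative; return value proved equal).

-- ===== PORT A =====
-- zip(*rows) ported by hand (exact): element j (for j below the minimum row length) is the list of
-- j-th entries of each row, in row order; zip of an empty argument list is []. The `.getD j ' '`
-- default is never used: j < m ≤ length of every row.
def pyZipCols (rows : List (List Char)) : List (List Char) :=
  match rows with
  | [] => []
  | r0 :: rest =>
      let m := rest.foldl (fun acc r => min acc r.length) r0.length
      (List.range m).map (fun j => (r0 :: rest).map (fun r => r.getD j ' '))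

def findMirror {α : Type} [DecidableEq α] (grid : List α) : Int :=
  match (PySem.List.pyRange 1 (grid.length : Int) 1).find? (fun i =>
      let above := (PySem.List.slice? (PySem.List.slice grid none (some i)) none none (-1)).getD []
      let below := PySem.List.slice grid (some i) none
      let above2 := PySem.List.slice above none (some (below.length : Int))
      let below2 := PySem.List.slice below none (some (above2.length : Int))
      decide (above2 = below2)) with
  | some i => i
  | none => 0

def part1 (data : List String) : Int :=
  data.foldl (fun ans block =>
    let grid := (PySem.Str.split? block "\n").getD []
    let row := findMirror grid
    let ans := ans + row * 100
    let col := findMirror (pyZipCols (grid.map String.toList))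
    ans + col) 0

-- ===== PORT B =====
-- the Z-function inner while loop: extend a match of length k at shift i (indices provably in
-- range in every call: k ≤ i + k, so the added `k < s.length` guard only serves totality).
def zext {α : Type} [DecidableEq α] (s : List α) (i k : Nat) : Nat :=
  if h : i + k < s.length ∧ k < s.length then
    if s[k]'h.2 = s[i + k]'h.1 then zext s i (k + 1) else k
  else k
termination_by s.length - (i + k)
decreasing_by omega

-- one iteration of the Z loop on state (z, l, r); Python's `z[i] = k` is List.set
def zstep {α : Type} [DecidableEq α] (s : List α) (st : List Nat × Nat × Nat) (i : Nat) :
    List Nat × Nat × Nat :=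
  let k0 := if i < st.2.2 then min (st.1.getD (i - st.2.1) 0) (st.2.2 - i) else 0
  let k := zext s i k0
  (st.1.set i k, if st.2.2 < i + k then (i, i + k) else st.2)

def zarr {α : Type} [DecidableEq α] (s : List α) : List Nat :=
  ((List.range' 1 (s.length - 1)).foldl (zstep s) (List.replicate s.length 0, 0, 0)).1

-- rows + [None] + rows[::-1] is modelled as `map some` with `none` the sentinel (a row is never None)
def mirrorB {α : Type} [DecidableEq α] (rows : List α) : Int :=
  let n := rows.length
  if n < 2 then 0
  else
    let rev := rows.reverse
    let zl := zarr (rows.map some ++ [(none : Option α)] ++ rev.map some)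
    let zr := zarr (rev.map some ++ [(none : Option α)] ++ rows.map some)
    match (List.range' 1 (n - 1)).find? (fun i =>
        if 2 * i ≤ n then zl.getD (2 * n + 1 - 2 * i) 0 == 2 * i
        else zr.getD (2 * n + 1 - 2 * (n - i)) 0 == 2 * (n - i)) with
    | some i => (i : Int)
    | none => 0

def part1_alt (data : List String) : Int :=
  data.foldl (fun total block =>
    let rows := (PySem.Str.split? block "\n").getD []
    let total := total + 100 * mirrorB rows
    total + mirrorB (pyZipCols (rows.map String.toList))) 0

-- ===== PRECONDITION & SPEC =====
def Spec_part1 (data : List String) (out : Int) : Prop := out = part1_alt data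
instance (data : List String) (out : Int) : Decidable (Spec_part1 data out) := by unfold Spec_part1; infer_instance

-- ===== CLAIM (what is proved, stated in full; the proofs are below) =====
def Claim_equal_part1 : Prop := ∀ (data : List String), Dom_part1 data → Spec_part1 data (part1 data)

-- ===== LEMMAS AND PROOFS =====

-- length of the longest common prefix of two lists
def lcpLen {α : Type} [DecidableEq α] : List α → List α → Nat
  | a :: as, b :: bs => if a = b then lcpLen as bs + 1 else 0
  | _, _ => 0

theorem lcp_le {α : Type} [DecidableEq α] (a b : List α) : lcpLen a b ≤ b.length := by
  induction a generalizing b with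
  | nil => cases b <;> simp [lcpLen]
  | cons x as ih =>
    cases b with
    | nil => simp [lcpLen]
    | cons y bs =>
      simp only [lcpLen, List.length_cons]
      split_ifs
      · exact Nat.succ_le_succ (ih bs)
      · omega

theorem lcp_get {α : Type} [DecidableEq α] (a b : List α) (j : Nat) (h : j < lcpLen a b) :
    a[j]? = b[j]? := by
  induction a generalizing b j with
  | nil => cases b <;> simp [lcpLen] at h
  | cons x as ih =>
    cases b with
    | nil => simp [lcpLen] at h
    | cons y bs =>
      simp only [lcpLen] at h
      split_ifs at h with hxy
      · cases j with
        | zero => simp [hxy]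
        | succ j' => simpa using ih bs j' (by omega)
      · omega

theorem lcp_split {α : Type} [DecidableEq α] (a b : List α) (k : Nat)
    (hag : ∀ j < k, a[j]? = b[j]?) (hk : k ≤ b.length) :
    lcpLen a b = k + lcpLen (a.drop k) (b.drop k) := by
  induction k generalizing a b with
  | zero => simp
  | succ k' ih =>
    cases b with
    | nil => simp at hk
    | cons y bs =>
      have h0 : a[0]? = some y := by simpa using hag 0 (by omega)
      cases a with
      | nil => simp at h0
      | cons x as =>
        have hxy : x = y := by simpa using h0
        subst hxy
        simp only [lcpLen, if_true, List.drop_succ_cons]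
        rw [ih as bs (fun j hj => by simpa using hag (j + 1) (by omega)) (by simpa using hk)]
        omega

theorem lcp_eq_len_iff {α : Type} [DecidableEq α] (a b : List α) :
    lcpLen a b = b.length ↔ a.take b.length = b := by
  induction a generalizing b with
  | nil =>
    cases b with
    | nil => simp [lcpLen]
    | cons y bs => simp [lcpLen]
  | cons x as ih =>
    cases b with
    | nil => simp [lcpLen]
    | cons y bs =>
      simp only [lcpLen, List.length_cons, List.take_succ_cons]
      split_ifs with hxy
      · subst hxy
        rw [Nat.add_right_cancel_iff ]
        rw [ih bs]
        constructor
        · intro h; rw [h]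
        · intro h; exact (List.cons_inj_right x).mp h
      · constructor
        · intro h; exact h.elim
        · intro h; exact absurd (List.head_eq_of_cons_eq h) hxy

theorem zext_eq {α : Type} [DecidableEq α] (s : List α) (i k : Nat) :
    zext s i k = k + lcpLen (s.drop k) (s.drop (i + k)) := by
  fun_induction zext s i k with
  | case1 k h heq ih =>
    rw [ih, show i + (k+1) = i + k + 1 from by omega]
    rw [List.drop_eq_getElem_cons h.2, List.drop_eq_getElem_cons h.1]
    simp only [lcpLen, heq, if_true]
    omega
  | case2 k h heq =>
    rw [List.drop_eq_getElem_cons h.2, List.drop_eq_getElem_cons h.1]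
    simp [lcpLen, heq]
  | case3 k h =>
    have : s.drop (i + k) = [] := List.drop_eq_nil_of_le (by omega)
    rw [this]
    cases s.drop k <;> simp [lcpLen]

theorem lcp_nil {α : Type} [DecidableEq α] (a : List α) : lcpLen a [] = 0 := by
  cases a <;> simp [lcpLen]

-- the Z-loop invariant: z holds the true Z-values up to m, and (l, r) is a valid match window
def ZInv {α : Type} [DecidableEq α] (s : List α) (m : Nat) (st : List Nat × Nat × Nat) : Prop :=
  st.1.length = s.length ∧
  (∀ j, 1 ≤ j → j ≤ m → st.1.getD j 0 = lcpLen s (s.drop j)) ∧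
  (st.2 = (0, 0) ∨ (1 ≤ st.2.1 ∧ st.2.1 ≤ m ∧ st.2.2 = st.2.1 + lcpLen s (s.drop st.2.1)))

theorem zinv_step {α : Type} [DecidableEq α] (s : List α) (m : Nat)
    (st : List Nat × Nat × Nat) (h : ZInv s m st) : ZInv s (m + 1) (zstep s st (m + 1)) := by
  obtain ⟨z, l, r⟩ := st
  obtain ⟨hlen, hz, hlr⟩ := h
  dsimp only at hlen hz hlr
  have key : ∀ k0 : Nat, (∀ j, j < k0 → s[j]? = s[(m+1) + j]?) → k0 ≤ s.length - (m+1) →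
      zext s (m+1) k0 = lcpLen s (s.drop (m+1)) := by
    intro k0 hag hk
    rw [zext_eq, lcp_split s (s.drop (m+1)) k0
        (fun j hj => by rw [List.getElem?_drop]; exact hag j hj)
        (by rw [List.length_drop]; exact hk), List.drop_drop]
  have hK : zext s (m+1) (if (m+1) < r then min (z.getD ((m+1) - l) 0) (r - (m+1)) else 0)
      = lcpLen s (s.drop (m+1)) := by
    by_cases hir : (m+1) < r
    · rw [if_pos hir]
      rcases hlr with h00 | ⟨hl1, hlm, hr⟩
      · exfalso
        have : r = 0 := congrArg Prod.snd h00
        omega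
      · have hjl : z.getD ((m+1) - l) 0 = lcpLen s (s.drop ((m+1) - l)) :=
          hz _ (by omega) (by omega)
        have hrle : r ≤ s.length := by
          have h1 := lcp_le s (s.drop l)
          rw [List.length_drop] at h1
          omega
        apply key
        · intro j hj
          rw [hjl] at hj
          have h1 : s[j]? = s[((m+1)-l) + j]? := by
            have := lcp_get s (s.drop ((m+1)-l)) j (by omega)
            rwa [List.getElem?_drop] at this
          have h2 : s[((m+1)-l) + j]? = s[(m+1) + j]? := by
            have hlt : ((m+1)-l) + j < lcpLen s (s.drop l) := by omega
            have h3 := lcp_get s (s.drop l) _ hlt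
            rw [List.getElem?_drop, show l + (((m+1)-l) + j) = (m+1) + j from by omega] at h3
            exact h3
          exact h1.trans h2
        · omega
    · rw [if_neg hir]
      apply key
      · intro j hj; exact absurd hj (Nat.not_lt_zero j)
      · omega
  have hstep : zstep s (z, l, r) (m+1)
      = (z.set (m+1) (lcpLen s (s.drop (m+1))),
         if r < (m+1) + lcpLen s (s.drop (m+1)) then ((m+1), (m+1) + lcpLen s (s.drop (m+1)))
         else (l, r)) := by
    simp only [zstep]
    rw [hK]
  rw [hstep]
  unfold ZInv
  dsimp only
  refine ⟨by simp [hlen], ?_, ?_⟩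
  · intro j hj1 hjm
    by_cases hje : j = m + 1
    · subst hje
      rw [List.getD_eq_getElem?_getD, List.getElem?_set]
      by_cases hin : m + 1 < z.length
      · simp [hin]
      · have : s.drop (m+1) = [] := List.drop_eq_nil_of_le (by omega)
        simp [hin, this, lcp_nil]
    · rw [List.getD_eq_getElem?_getD, List.getElem?_set_ne (fun hh => hje hh.symm),
        ← List.getD_eq_getElem?_getD]
      exact hz j hj1 (by omega)
  · by_cases hcase : r < (m+1) + lcpLen s (s.drop (m+1))
    · rw [if_pos hcase]
      right
      exact ⟨by omega, by omega, rfl⟩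
    · rw [if_neg hcase]
      rcases hlr with h00 | ⟨hl1, hlm, hr⟩
      · left; exact h00
      · right; exact ⟨hl1, by omega, hr⟩

theorem zinv_fold {α : Type} [DecidableEq α] (s : List α) (m : Nat) :
    ZInv s m ((List.range' 1 m).foldl (zstep s) (List.replicate s.length 0, 0, 0)) := by
  induction m with
  | zero =>
    refine ⟨by simp, fun j h1 h2 => by omega, Or.inl rfl⟩
  | succ m ih =>
    rw [List.range'_1_concat, List.foldl_append, List.foldl_cons, List.foldl_nil,
      Nat.add_comm 1 m]
    exact zinv_step s m _ ih

theorem zarr_getD {α : Type} [DecidableEq α] (s : List α) (j : Nat) (h1 : 1 ≤ j)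
    (h2 : j ≤ s.length - 1) : (zarr s).getD j 0 = lcpLen s (s.drop j) := by
  exact (zinv_fold s (s.length - 1)).2.1 j h1 h2

-- pointwise characterisation of even palindromes
theorem palPoint {α : Type} (t : List α) (m : Nat) (hlen : t.length = 2 * m) :
    t.reverse = t ↔ ∀ k < m, t[m - 1 - k]? = t[m + k]? := by
  constructor
  · intro h k hk
    have h2 := congrArg (fun l => l[m + k]?) h
    dsimp at h2
    rw [List.getElem?_reverse (by omega), show t.length - 1 - (m + k) = m - 1 - k from by omega]
      at h2
    exact h2
  · intro h
    apply List.ext_getElem?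
    intro u
    by_cases hu : u < 2 * m
    · rw [List.getElem?_reverse (by omega)]
      by_cases hum : u < m
      · have h2 := h (m - 1 - u) (by omega)
        rw [show m - 1 - (m - 1 - u) = u from by omega,
          show m + (m - 1 - u) = t.length - 1 - u from by omega] at h2
        exact h2.symm
      · have h2 := h (u - m) (by omega)
        rw [show m - 1 - (u - m) = t.length - 1 - u from by omega,
          show m + (u - m) = u from by omega] at h2
        exact h2
    · rw [List.getElem?_eq_none (by simp; omega), List.getElem?_eq_none (by omega)]

-- A's per-crease condition, pointwise (from the previous development)
theorem checkA_iff {α : Type} [DecidableEq α] (a : List α) (j : Nat) (hj1 : 1 ≤ j) (hj2 : j < a.length) :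
    ((a.take j).reverse.take (a.length - j)
       = (a.drop j).take ((a.take j).reverse.take (a.length - j)).length)
    ↔ (∀ k : Nat, k < min j (a.length - j) → a[j-1-k]? = a[j+k]?) := by
  have hlen : ((a.take j).reverse.take (a.length - j)).length = min j (a.length - j) := by
    simp [List.length_take, List.length_reverse]
    omega
  have habove : ∀ k : Nat, ((a.take j).reverse.take (a.length - j))[k]? =
      if k < min j (a.length - j) then a[j-1-k]? else none := by
    intro k
    by_cases hk : k < min j (a.length - j)
    · rw [if_pos hk]
      rw [List.getElem?_take_of_lt (by omega)]
      rw [List.getElem?_reverse (by simp; omega)]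
      rw [List.getElem?_take_of_lt (by simp; omega)]
      congr 1
      simp
      omega
    · rw [if_neg hk]
      apply List.getElem?_eq_none
      omega
  have hbelow : ∀ k : Nat, ((a.drop j).take ((a.take j).reverse.take (a.length - j)).length)[k]? =
      if k < min j (a.length - j) then a[j+k]? else none := by
    intro k
    by_cases hk : k < min j (a.length - j)
    · rw [if_pos hk, List.getElem?_take_of_lt (by omega), List.getElem?_drop]
    · rw [if_neg hk]
      apply List.getElem?_eq_none
      simp [hlen]
      omega
  constructor
  · intro h k hk
    have h2 := congrArg (fun l => l[k]?) h
    simp only [habove k, hbelow k, if_pos hk] at h2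
    exact h2
  · intro h
    apply List.ext_getElem?
    intro k
    rw [habove k, hbelow k]
    by_cases hk : k < min j (a.length - j)
    · simp [hk, h k hk]
    · simp [hk]

theorem lcp_eq_iff_take {α : Type} [DecidableEq α] (a b : List α) (c : Nat) (h : b.length = c) :
    lcpLen a b = c ↔ a.take c = b := by
  subst h; exact lcp_eq_len_iff a b

theorem ztest {α : Type} [DecidableEq α] (u v : List α) (c : Nat) (hc1 : 1 ≤ c)
    (hc2 : 2 * c ≤ v.length) (huv : u.length = v.length) :
    ((zarr (u.map some ++ [(none : Option α)] ++ v.map some)).getD (2 * u.length + 1 - 2 * c) 0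
      = 2 * c)
    ↔ u.take (2 * c) = v.drop (v.length - 2 * c) := by
  set n := v.length with hn
  set s := u.map some ++ [(none : Option α)] ++ v.map some with hs
  have hslen : s.length = 2 * n + 1 := by
    simp [hs, huv]; omega
  have hdrop : s.drop (2 * u.length + 1 - 2 * c) = (v.drop (n - 2 * c)).map some := by
    rw [hs, show 2 * u.length + 1 - 2 * c
        = (u.map some ++ [(none : Option α)]).length + (n - 2 * c) from by simp [huv]; omega]
    rw [List.drop_length_add_append, List.map_drop]
  have hblen : ((v.drop (n - 2 * c)).map some).length = 2 * c := by simp; omega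
  have htake : s.take (2 * c) = (u.take (2 * c)).map some := by
    rw [hs, List.take_append_of_le_length (by simp [huv]; omega),
      List.take_append_of_le_length (by simp [huv]; omega), List.map_take]
  rw [zarr_getD s _ (by omega) (by omega), hdrop]
  refine (lcp_eq_iff_take s _ (2 * c) hblen).trans ?_
  rw [htake, List.map_inj_right (fun x y h => Option.some_injective α h)]

-- B's test at crease j equals A's pointwise mirror condition
theorem btest_iff {α : Type} [DecidableEq α] (a : List α) (j : Nat) (hj1 : 1 ≤ j)
    (hj2 : j < a.length) :
    ((if 2 * j ≤ a.length then
        (zarr (a.map some ++ [(none : Option α)] ++ a.reverse.map some)).getD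
          (2 * a.length + 1 - 2 * j) 0 == 2 * j
      else
        (zarr (a.reverse.map some ++ [(none : Option α)] ++ a.map some)).getD
          (2 * a.length + 1 - 2 * (a.length - j)) 0 == 2 * (a.length - j)) = true)
    ↔ (∀ k : Nat, k < min j (a.length - j) → a[j-1-k]? = a[j+k]?) := by
  set n := a.length with hn
  by_cases hc : 2 * j ≤ n
  · rw [if_pos hc, beq_iff_eq]
    have hz := ztest a a.reverse j hj1 (by simp [← hn]; omega) (by simp)
    rw [hz, List.length_reverse, ← List.reverse_take, eq_comm,
      palPoint (a.take (2 * j)) j (by rw [List.length_take]; omega),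
      show min j (n - j) = j from by omega]
    refine forall_congr' (fun k => imp_congr_right (fun hk => ?_))
    rw [List.getElem?_take_of_lt (by omega), List.getElem?_take_of_lt (by omega)]
  · rw [if_neg hc, beq_iff_eq]
    have hz := ztest a.reverse a (n - j) (by omega) (by omega) (by simp)
    rw [show 2 * a.reverse.length + 1 - 2 * (n - j) = 2 * n + 1 - 2 * (n - j) from by
      rw [List.length_reverse]] at hz
    rw [hz]
    have h5 : a.reverse.take (2 * (n - j)) = (a.drop (n - 2 * (n - j))).reverse := by
      have h6 := List.reverse_take (l := a.reverse) (i := 2 * (n - j))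
      rw [List.reverse_reverse, List.length_reverse] at h6
      rw [← h6, List.reverse_reverse]
    rw [h5]
    rw [palPoint (a.drop (n - 2 * (n - j))) (n - j) (by rw [List.length_drop]; omega),
      show min j (n - j) = n - j from by omega]
    refine forall_congr' (fun k => imp_congr_right (fun hk => ?_))
    rw [List.getElem?_drop, List.getElem?_drop,
      show n - 2 * (n - j) + (n - j - 1 - k) = j - 1 - k from by omega,
      show n - 2 * (n - j) + (n - j + k) = j + k from by omega]

theorem find?_congr'' {α : Type} {l : List α} {p q : α → Bool} (h : ∀ x ∈ l, p x = q x) :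
    l.find? p = l.find? q := by
  induction l with
  | nil => rfl
  | cons a t ih =>
    simp only [List.find?]
    rw [h a (by simp)]
    cases q a
    · exact ih (fun x hx => h x (by simp [hx]))
    · rfl

theorem mirror_eq {α : Type} [DecidableEq α] (a : List α) : findMirror a = mirrorB a := by
  unfold findMirror mirrorB
  by_cases hn : a.length < 2
  · rw [if_pos hn]
    have h0 : PySem.List.pyRange 1 (a.length : Int) 1 = [] :=
      PySem.List.pyRange_one_eq_nil (by omega)
    rw [h0]
    rfl
  · rw [if_neg hn]
    rw [PySem.List.pyRange_one, List.range'_eq_map_range,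
      show (((a.length : Int) - 1).toNat) = a.length - 1 from by omega,
      List.find?_map]
    simp only [List.find?_map]
    rw [find?_congr'' (p := _) (q := ((fun i =>
        if 2 * i ≤ a.length then
          (zarr (a.map some ++ [(none : Option α)] ++ a.reverse.map some)).getD
            (2 * a.length + 1 - 2 * i) 0 == 2 * i
        else
          (zarr (a.reverse.map some ++ [(none : Option α)] ++ a.map some)).getD
            (2 * a.length + 1 - 2 * (a.length - i)) 0 == 2 * (a.length - i)) ∘
        (fun x => 1 + x)))]
    · cases hfind : (List.range (a.length - 1)).find? _ with
      | none => rfl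
      | some k =>
        simp only [Option.map_some]
        push_cast
        ring
    · intro k hk
      rw [List.mem_range] at hk
      set j : Nat := 1 + k with hj
      have hj1 : 1 ≤ j := by omega
      have hj2 : j < a.length := by omega
      have hcast : (1 : Int) + (k : Int) = ((j : Nat) : Int) := by omega
      simp only [Function.comp_apply, hcast]
      simp only [PySem.List.slice_to_natCast, PySem.List.slice_from_natCast,
        PySem.List.slice?_none_none_neg_one, Option.getD_some, List.length_drop]
      rw [Bool.eq_iff_iff, decide_eq_true_eq]
      rw [checkA_iff a j hj1 hj2]
      exact (btest_iff a j hj1 hj2).symm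

-- ===== VERDICT (by name: the statement is the Claim_ definition above) =====
theorem part1_spec : Claim_equal_part1 := by
  intro data _
  unfold Spec_part1 part1 part1_alt
  congr 1
  funext ans block
  simp only []
  rw [mirror_eq, mirror_eq]
  ring
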